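-- pv_equiv track=rewrite | github.com/LokendraCSpiet/Wipro-Python-Training | Other Question/p1.py | consecutive_combo
-- ===== SOURCE A (Python) =====
-- def consecutive_combo(l1,l2):
--     l1.extend(l2)
--
--     check = l1[0]
--     flag = True
--     for i in range(1,len(l1)):
--         if l1[i] - check != 1:
--             flag = False
--         check = l1[i]
--
--     return flag
-- ===== SOURCE B (Python) =====
-- def consecutive_combo(l1, l2):
--     # Mutates l1 in place like A (l1.extend(l2)); equivalence is about the return value.
--     l1.extend(l2)
--     expected = [l1[0] + i for i in range(len(l1))]
--     return l1 == expected
-- ===== Notes on version B (the rewrite author's own statement) =====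
-- stated objective: simpler
-- what changed: Replaced the stateful check/flag element-by-element difference loop with building the ideal consecutive run from the first element and comparing the whole merged list against it.
import Mathlib
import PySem

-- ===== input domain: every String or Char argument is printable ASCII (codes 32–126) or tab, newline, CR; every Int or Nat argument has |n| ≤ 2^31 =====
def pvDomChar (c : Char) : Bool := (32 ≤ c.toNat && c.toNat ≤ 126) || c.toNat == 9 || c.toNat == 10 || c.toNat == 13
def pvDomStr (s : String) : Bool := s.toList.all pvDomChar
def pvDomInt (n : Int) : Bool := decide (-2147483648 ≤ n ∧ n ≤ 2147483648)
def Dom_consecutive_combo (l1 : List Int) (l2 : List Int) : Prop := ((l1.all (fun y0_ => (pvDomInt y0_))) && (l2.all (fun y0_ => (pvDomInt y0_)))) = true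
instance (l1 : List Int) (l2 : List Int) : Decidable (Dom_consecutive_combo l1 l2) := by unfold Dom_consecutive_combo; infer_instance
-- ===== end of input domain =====

-- B replaces A's stateful check/flag difference loop by building the ideal consecutive run from the
-- first element and comparing whole lists (objective: simpler). Both A and B mutate l1 in place
-- (l1.extend(l2)); the equivalence proved here is about the return value.

-- ===== PORT A =====
-- l1.extend(l2): the merged list; check = l1[0] (IndexError on empty, excluded by Pre_)
def consecutive_combo (l1 : List Int) (l2 : List Int) : Bool :=
  let l := l1 ++ l2
  let check := PySem.List.pyGetD l 0 0
  let st := (PySem.List.pyRange 1 l.length 1).foldl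
    (fun (s : Bool × Int) i =>
      ((if PySem.List.pyGetD l i 0 - s.2 ≠ 1 then false else s.1), PySem.List.pyGetD l i 0))
    (true, check)
  st.1

-- ===== PORT B =====
-- expected = [l1[0] + i for i in range(len(l1))]; l1[0] is never evaluated when the range is empty
def consecutive_combo_alt (l1 : List Int) (l2 : List Int) : Bool :=
  let l := l1 ++ l2
  let expected := (PySem.List.pyRange 0 l.length 1).map (fun i => PySem.List.pyGetD l 0 0 + i)
  l == expected

-- ===== PRECONDITION & SPEC =====
-- Pre_ excludes only the empty merged list, on which A raises IndexError at l1[0].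
def Pre_consecutive_combo (l1 : List Int) (l2 : List Int) : Prop := l1 ++ l2 ≠ []
instance (l1 : List Int) (l2 : List Int) : Decidable (Pre_consecutive_combo l1 l2) := by
  unfold Pre_consecutive_combo; infer_instance
def pvWitness_consecutive_combo : List Int × List Int := ([3, 4], [5])

def Spec_consecutive_combo (l1 : List Int) (l2 : List Int) (out : Bool) : Prop :=
  out = consecutive_combo_alt l1 l2
instance (l1 : List Int) (l2 : List Int) (out : Bool) : Decidable (Spec_consecutive_combo l1 l2 out) := by
  unfold Spec_consecutive_combo; infer_instance

-- ===== CLAIM (what is proved, stated in full; the proofs are below) =====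
def Claim_equal_consecutive_combo : Prop := ∀ (l1 : List Int) (l2 : List Int), Dom_consecutive_combo l1 l2 → Pre_consecutive_combo l1 l2 → Spec_consecutive_combo l1 l2 (consecutive_combo l1 l2)

-- ===== LEMMAS AND PROOFS =====

-- "the list is c, c+1, c+2, …" as a recursive predicate; both ports are reduced to it.
def chainFrom : Int → List Int → Bool
  | _, [] => true
  | c, v :: t => (v == c) && chainFrom (c + 1) t

theorem foldA_eq_chainFrom (t : List Int) (flag : Bool) (c0 : Int) :
    (t.foldl (fun (s : Bool × Int) v => ((if v - s.2 ≠ 1 then false else s.1), v)) (flag, c0)).1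
      = (flag && chainFrom (c0 + 1) t) := by
  induction t generalizing flag c0 with
  | nil => simp [chainFrom]
  | cons v t ih =>
    simp only [List.foldl_cons, chainFrom, ih]
    by_cases h : v = c0 + 1
    · subst h; simp
    · have h1 : v - c0 ≠ 1 := by omega
      have h2 : (v == c0 + 1) = false := by simp [h]
      simp [h1, h2]

theorem beq_range_eq_chainFrom (t : List Int) (c0 : Int) :
    (t == (List.range t.length).map (fun (k : Nat) => c0 + (k : Int))) = chainFrom c0 t := by
  induction t generalizing c0 with
  | nil => simp [chainFrom]
  | cons v t ih =>
    have hr : (List.range (t.length + 1)).map (fun (k : Nat) => c0 + (k : Int))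
        = c0 :: (List.range t.length).map (fun (k : Nat) => (c0 + 1) + (k : Int)) := by
      rw [List.range_succ_eq_map, List.map_cons, List.map_map]
      refine congrArg₂ _ (by simp) ?_
      exact List.map_congr_left (fun k _ => by
        simp only [Function.comp_apply, Nat.succ_eq_add_one]; push_cast; ring)
    simp only [List.length_cons, hr, List.cons_beq_cons, chainFrom, ih]

theorem consecutive_combo_eq (l1 l2 : List Int) (h : Pre_consecutive_combo l1 l2) :
    consecutive_combo l1 l2 = consecutive_combo_alt l1 l2 := by
  unfold Pre_consecutive_combo at h
  obtain ⟨c0, t, hl⟩ : ∃ c0 t, l1 ++ l2 = c0 :: t :=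
    match l1 ++ l2, h with
    | c :: t, _ => ⟨c, t, rfl⟩
  unfold consecutive_combo consecutive_combo_alt
  simp only [hl, PySem.List.pyGetD_zero_cons]
  rw [PySem.List.foldl_pyRange_pyGetD' (c0 :: t) 0
      (fun (s : Bool × Int) v => ((if v - s.2 ≠ 1 then false else s.1), v)) (true, c0)
      (by norm_num)]
  rw [show ((1 : Int).toNat) = 1 from rfl, List.drop_one, List.tail_cons,
      foldA_eq_chainFrom, PySem.List.pyRange_one, List.map_map]
  have hmap : ((List.range (((( (c0 :: t).length : Int)) - 0).toNat)).map
      ((fun i => c0 + i) ∘ fun (k : Nat) => (0 : Int) + (k : Int)))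
      = (List.range (c0 :: t).length).map (fun (k : Nat) => c0 + (k : Int)) := by
    simp
  rw [hmap, beq_range_eq_chainFrom]
  simp [chainFrom]

-- ===== VERDICT (by name: the statement is the Claim_ definition above) =====
theorem consecutive_combo_spec : Claim_equal_consecutive_combo := by
  intro l1 l2 _ hpre
  unfold Spec_consecutive_combo
  exact consecutive_combo_eq l1 l2 hpre
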